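-- pv_equiv track=rewrite | github.com/Borjampm/proyecto-titulo-grupo-3 | backend/app/excel_uploader.py | calculate_rut_verifier
-- ===== SOURCE A (Python) =====
-- def calculate_rut_verifier(rut_number: int) -> str:
--     """
--     Calculate the verification digit for a RUT.
--
--     Args:
--         rut_number: The RUT number without verification digit
--
--     Returns:
--         The verification digit (0-9 or K)
--     """
--     multiplier = 2
--     sum_value = 0
--
--     while rut_number > 0:
--         sum_value += (rut_number % 10) * multiplier
--         rut_number //= 10
--         multiplier += 1
--         if multiplier > 7:
--             multiplier = 2
--
--     remainder = sum_value % 11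
--     verifier = 11 - remainder
--
--     if verifier == 11:
--         return "0"
--     elif verifier == 10:
--         return "K"
--     else:
--         return str(verifier)
-- ===== SOURCE B (Python) =====
-- def calculate_rut_verifier(rut_number: int) -> str:
--     """Calculate the verification digit for a RUT.
--
--     Processes the number in six-digit blocks (the weight pattern 2..7 has
--     period 6), applying the fixed weight tuple to each block's digits.
--     """
--     total = 0
--     n = rut_number
--     while n > 0:
--         n, block = divmod(n, 1000000)
--         for w in (2, 3, 4, 5, 6, 7):
--             block, d = divmod(block, 10)
--             total += d * w
--     verifier = 11 - total % 11
--     if verifier == 11: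
--         return "0"
--     if verifier == 10:
--         return "K"
--     return str(verifier)
-- ===== Notes on version B (the rewrite author's own statement) =====
-- stated objective: alternative
-- what changed: Replaces the per-digit loop with a cycling multiplier counter by processing the number in six-digit blocks (the weight pattern 2..7 has period 6), applying a fixed weight tuple to each block via divmod; no multiplier state or reset branch remains.
import Mathlib
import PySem

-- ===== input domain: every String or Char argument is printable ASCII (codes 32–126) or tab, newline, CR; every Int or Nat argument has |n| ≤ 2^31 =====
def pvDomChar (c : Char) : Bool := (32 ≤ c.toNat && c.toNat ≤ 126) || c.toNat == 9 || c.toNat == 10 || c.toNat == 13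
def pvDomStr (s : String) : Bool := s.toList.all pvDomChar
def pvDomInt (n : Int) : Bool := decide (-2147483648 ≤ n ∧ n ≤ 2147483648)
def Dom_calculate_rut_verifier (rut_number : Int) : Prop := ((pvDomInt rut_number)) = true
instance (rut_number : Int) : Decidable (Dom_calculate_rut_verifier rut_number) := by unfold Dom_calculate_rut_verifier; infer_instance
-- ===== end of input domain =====

-- B processes the number in six-digit blocks with a fixed weight tuple instead of A's
-- per-digit loop with a cycling multiplier counter; same result, proved below.
-- (Loops are ported with a fuel parameter n.toNat, which bounds the iteration count.)

-- ===== PORT A =====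
-- the while loop: state (rut_number, multiplier, sum_value); fuel only makes it total
def pvLoopA : Nat → Int → Int → Int → Int
  | 0, _, _, s => s
  | fuel + 1, n, mult, s =>
    if n > 0 then
      pvLoopA fuel (PySem.Int.floordiv n 10)
        (if mult + 1 > 7 then 2 else mult + 1)
        (s + PySem.Int.mod n 10 * mult)
    else s

def calculate_rut_verifier (rut_number : Int) : String :=
  let sum_value := pvLoopA rut_number.toNat rut_number 2 0
  let remainder := PySem.Int.mod sum_value 11
  let verifier := 11 - remainder
  if verifier == 11 then "0"
  else if verifier == 10 then "K"
  else PySem.Int.toStr verifier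

-- ===== PORT B =====
-- the outer while loop of Source B: state (n, total); the inner 'for w in (2,...,7)'
-- is the foldl over the weight tuple with state (block, total); fuel only makes it total
def pvLoopB : Nat → Int → Int → Int
  | 0, _, total => total
  | fuel + 1, n, total =>
    if n > 0 then
      pvLoopB fuel (PySem.Int.floordiv n 1000000)
        (([2, 3, 4, 5, 6, 7] : List Int).foldl
          (fun (st : Int × Int) w => (PySem.Int.floordiv st.1 10, st.2 + PySem.Int.mod st.1 10 * w))
          (PySem.Int.mod n 1000000, total)).2
    else total

def calculate_rut_verifier_alt (rut_number : Int) : String :=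
  let total := pvLoopB rut_number.toNat rut_number 0
  let verifier := 11 - PySem.Int.mod total 11
  if verifier == 11 then "0"
  else if verifier == 10 then "K"
  else PySem.Int.toStr verifier

-- ===== PRECONDITION & SPEC =====
def Spec_calculate_rut_verifier (rut_number : Int) (out : String) : Prop := out = calculate_rut_verifier_alt rut_number
instance (rut_number : Int) (out : String) : Decidable (Spec_calculate_rut_verifier rut_number out) := by unfold Spec_calculate_rut_verifier; infer_instance

-- ===== CLAIM (what is proved, stated in full; the proofs are below) =====
def Claim_equal_calculate_rut_verifier : Prop := ∀ (rut_number : Int), Dom_calculate_rut_verifier rut_number → Spec_calculate_rut_verifier rut_number (calculate_rut_verifier rut_number)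

-- ===== LEMMAS AND PROOFS =====

theorem pvLoopA_nonpos (f : Nat) (n mult s : Int) (h : ¬ n > 0) : pvLoopA f n mult s = s := by
  cases f with
  | zero => rfl
  | succ f => simp [pvLoopA, h]

theorem pvLoopB_nonpos (f : Nat) (n total : Int) (h : ¬ n > 0) : pvLoopB f n total = total := by
  cases f with
  | zero => rfl
  | succ f => simp [pvLoopB, h]

-- with enough fuel, the result does not depend on the fuel
theorem pvLoopA_fuel (f1 : Nat) : ∀ (f2 : Nat) (n mult s : Int), n.toNat ≤ f1 → n.toNat ≤ f2 →
    pvLoopA f1 n mult s = pvLoopA f2 n mult s := by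
  induction f1 with
  | zero =>
    intro f2 n mult s h1 h2
    have h : ¬ n > 0 := by omega
    rw [pvLoopA_nonpos _ _ _ _ h, pvLoopA_nonpos _ _ _ _ h]
  | succ f1 ih =>
    intro f2 n mult s h1 h2
    by_cases hpos : n > 0
    · cases f2 with
      | zero => omega
      | succ f2 =>
        simp only [pvLoopA, hpos, if_true]
        have h10 : PySem.Int.floordiv n 10 = n / 10 := PySem.Int.floordiv_eq_ediv_of_pos (by norm_num)
        exact ih f2 _ _ _ (by rw [h10]; omega) (by rw [h10]; omega)
    · rw [pvLoopA_nonpos _ _ _ _ hpos, pvLoopA_nonpos _ _ _ _ hpos]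

-- loop step, valid for any nonnegative n with enough fuel (at n = 0 both sides are s)
theorem pvLoopA_step (f : Nat) (n mult s : Int) (hn : 0 ≤ n) (hf : n.toNat ≤ f) :
    pvLoopA f n mult s =
      pvLoopA f (n / 10) (if mult + 1 > 7 then 2 else mult + 1) (s + n % 10 * mult) := by
  by_cases hpos : n > 0
  · cases f with
    | zero => exact absurd hf (by omega)
    | succ f =>
      conv_lhs => rw [pvLoopA]
      simp only [hpos, if_true,
        PySem.Int.floordiv_eq_ediv_of_pos (by norm_num : (0:Int) < 10),
        PySem.Int.mod_eq_emod_of_pos (by norm_num : (0:Int) < 10)]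
      apply pvLoopA_fuel
      · omega
      · omega
  · have h0 : n = 0 := by omega
    subst h0
    rw [pvLoopA_nonpos _ _ _ _ hpos, pvLoopA_nonpos]
    · norm_num
    · norm_num

theorem pvLoopA_step2 (f : Nat) (n s : Int) (hn : 0 ≤ n) (hf : n.toNat ≤ f) :
    pvLoopA f n 2 s = pvLoopA f (n / 10) 3 (s + n % 10 * 2) := by
  rw [pvLoopA_step f n 2 s hn hf]; norm_num

theorem pvLoopA_step3 (f : Nat) (n s : Int) (hn : 0 ≤ n) (hf : n.toNat ≤ f) :
    pvLoopA f n 3 s = pvLoopA f (n / 10) 4 (s + n % 10 * 3) := by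
  rw [pvLoopA_step f n 3 s hn hf]; norm_num

theorem pvLoopA_step4 (f : Nat) (n s : Int) (hn : 0 ≤ n) (hf : n.toNat ≤ f) :
    pvLoopA f n 4 s = pvLoopA f (n / 10) 5 (s + n % 10 * 4) := by
  rw [pvLoopA_step f n 4 s hn hf]; norm_num

theorem pvLoopA_step5 (f : Nat) (n s : Int) (hn : 0 ≤ n) (hf : n.toNat ≤ f) :
    pvLoopA f n 5 s = pvLoopA f (n / 10) 6 (s + n % 10 * 5) := by
  rw [pvLoopA_step f n 5 s hn hf]; norm_num

theorem pvLoopA_step6 (f : Nat) (n s : Int) (hn : 0 ≤ n) (hf : n.toNat ≤ f) :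
    pvLoopA f n 6 s = pvLoopA f (n / 10) 7 (s + n % 10 * 6) := by
  rw [pvLoopA_step f n 6 s hn hf]; norm_num

theorem pvLoopA_step7 (f : Nat) (n s : Int) (hn : 0 ≤ n) (hf : n.toNat ≤ f) :
    pvLoopA f n 7 s = pvLoopA f (n / 10) 2 (s + n % 10 * 7) := by
  rw [pvLoopA_step f n 7 s hn hf]; norm_num

theorem pvLoopA_eq_pvLoopB (k : Nat) : ∀ (n s : Int) (f g : Nat),
    n.toNat ≤ f → n.toNat ≤ g → n.toNat ≤ k →
    pvLoopA f n 2 s = pvLoopB g n s := by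
  induction k with
  | zero =>
    intro n s f g hf hg hk
    have h : ¬ n > 0 := by omega
    rw [pvLoopA_nonpos _ _ _ _ h, pvLoopB_nonpos _ _ _ h]
  | succ k ih =>
    intro n s f g hf hg hk
    by_cases hpos : n > 0
    · have hn0 : (0:Int) ≤ n := le_of_lt hpos
      -- unroll A's loop six times (fuel is unchanged, divisions only shrink the bound)
      rw [pvLoopA_step2 f n s hn0 hf]
      rw [pvLoopA_step3 f _ _ (by omega) (by omega)]
      rw [pvLoopA_step4 f _ _ (by omega) (by omega)]
      rw [pvLoopA_step5 f _ _ (by omega) (by omega)]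
      rw [pvLoopA_step6 f _ _ (by omega) (by omega)]
      rw [pvLoopA_step7 f _ _ (by omega) (by omega)]
      -- unfold B's outer iteration once
      obtain ⟨g', rfl⟩ : ∃ g', g = g' + 1 := ⟨g - 1, by omega⟩
      simp only [pvLoopB, hpos, if_true, List.foldl,
        PySem.Int.floordiv_eq_ediv_of_pos (by norm_num : (0:Int) < 10),
        PySem.Int.mod_eq_emod_of_pos (by norm_num : (0:Int) < 10),
        PySem.Int.floordiv_eq_ediv_of_pos (by norm_num : (0:Int) < 1000000),
        PySem.Int.mod_eq_emod_of_pos (by norm_num : (0:Int) < 1000000)]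
      -- the six low digits of n are the digits of the block n % 1000000
      have hd0 : n % 1000000 % 10 = n % 10 := by omega
      have hd1 : n % 1000000 / 10 % 10 = n / 10 % 10 := by omega
      have hd2 : n % 1000000 / 10 / 10 % 10 = n / 10 / 10 % 10 := by omega
      have hd3 : n % 1000000 / 10 / 10 / 10 % 10 = n / 10 / 10 / 10 % 10 := by omega
      have hd4 : n % 1000000 / 10 / 10 / 10 / 10 % 10 = n / 10 / 10 / 10 / 10 % 10 := by omega
      have hd5 : n % 1000000 / 10 / 10 / 10 / 10 / 10 % 10 = n / 10 / 10 / 10 / 10 / 10 % 10 := by omega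
      have harg : n / 10 / 10 / 10 / 10 / 10 / 10 = n / 1000000 := by omega
      rw [hd0, hd1, hd2, hd3, hd4, hd5, harg]
      exact ih (n / 1000000) _ f g' (by omega) (by omega) (by omega)
    · rw [pvLoopA_nonpos _ _ _ _ hpos, pvLoopB_nonpos _ _ _ hpos]

-- ===== VERDICT (by name: the statement is the Claim_ definition above) =====
theorem calculate_rut_verifier_spec : Claim_equal_calculate_rut_verifier := by
  intro n _
  unfold Spec_calculate_rut_verifier calculate_rut_verifier calculate_rut_verifier_alt
  rw [pvLoopA_eq_pvLoopB n.toNat n 0 n.toNat n.toNat (le_refl _) (le_refl _) (le_refl _)]
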